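-- pv_equiv track=rewrite | github.com/lovemeaha/OCR_by_MI | test_model.py | get_bin_table
-- ===== SOURCE A (Python) =====
-- def get_bin_table(threshold=140):
-- 	"""
-- 	获取灰度转二值的映射table
-- 	:param threshold:
-- 	:return:
-- 	"""
-- 	table = []
-- 	for i in range(256):
-- 		if i < threshold:
-- 			table.append(0)
-- 		else:
-- 			table.append(1)
--
-- 	return table
-- ===== SOURCE B (Python) =====
-- def get_bin_table(threshold=140):
--     """
--     获取灰度转二值的映射table
--     :param threshold:
--     :return:
--     """
--     n = min(256, max(0, threshold))
--     return [0] * n + [1] * (256 - n)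
-- ===== Notes on version B (the rewrite author's own statement) =====
-- stated objective: simpler
-- what changed: Replaces the 0..255 loop with a per-element branch by a closed-form count of leading zeros n = min(256, max(0, threshold)) and a concatenation of two replicated runs [0]*n + [1]*(256-n).
import Mathlib
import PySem

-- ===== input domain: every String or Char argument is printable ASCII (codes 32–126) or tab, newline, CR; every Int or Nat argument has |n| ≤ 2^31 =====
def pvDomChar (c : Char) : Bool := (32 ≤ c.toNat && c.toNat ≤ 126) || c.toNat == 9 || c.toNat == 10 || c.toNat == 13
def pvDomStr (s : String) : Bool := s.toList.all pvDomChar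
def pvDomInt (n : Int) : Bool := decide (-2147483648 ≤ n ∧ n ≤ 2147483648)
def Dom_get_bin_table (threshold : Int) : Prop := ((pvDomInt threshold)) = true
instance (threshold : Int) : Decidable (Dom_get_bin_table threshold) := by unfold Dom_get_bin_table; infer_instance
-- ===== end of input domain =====

-- B replaces A's 0..255 loop-with-branch by clamping the threshold to n = min(256, max(0, threshold))
-- and concatenating two replicated runs [0]*n ++ [1]*(256-n): simpler count-and-replicate construction.


-- ===== PORT A =====
def get_bin_table (threshold : Int) : List Int :=
  (PySem.List.pyRange 0 256 1).foldl
    (fun table i => if i < threshold then table ++ [0] else table ++ [1]) []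

-- ===== PORT B =====
def get_bin_table_alt (threshold : Int) : List Int :=
  let n : Nat := (min 256 (max 0 threshold)).toNat
  List.replicate n 0 ++ List.replicate (256 - n) 1

-- ===== PRECONDITION & SPEC =====
def Spec_get_bin_table (threshold : Int) (out : List Int) : Prop := out = get_bin_table_alt threshold
instance (threshold : Int) (out : List Int) : Decidable (Spec_get_bin_table threshold out) := by unfold Spec_get_bin_table; infer_instance

-- ===== CLAIM (what is proved, stated in full; the proofs are below) =====
def Claim_equal_get_bin_table : Prop := ∀ (threshold : Int), Dom_get_bin_table threshold → Spec_get_bin_table threshold (get_bin_table threshold)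

-- ===== LEMMAS AND PROOFS =====

-- ===== VERDICT (by name: the statement is the Claim_ definition above) =====
theorem map_threshold_eq (threshold : Int) :
    (PySem.List.pyRange 0 256 1).map (fun i => if i < threshold then (0:Int) else 1)
      = get_bin_table_alt threshold := by
  have h0 : (0:Int) ≤ min 256 (max 0 threshold) := by omega
  have h1 : min 256 (max 0 threshold) ≤ 256 := by omega
  rw [PySem.List.pyRange_one_append 0 (min 256 (max 0 threshold)) 256 h0 h1, List.map_append]
  have hl : (PySem.List.pyRange 0 (min 256 (max 0 threshold)) 1).map
      (fun i => if i < threshold then (0:Int) else 1)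
      = List.replicate (PySem.List.pyRange 0 (min 256 (max 0 threshold)) 1).length 0 := by
    rw [List.map_congr_left (g := fun _ => (0:Int)) ?_, List.map_const']
    intro x hx
    have := (PySem.List.mem_pyRange_one).1 hx
    exact if_pos (by omega)
  have hr : (PySem.List.pyRange (min 256 (max 0 threshold)) 256 1).map
      (fun i => if i < threshold then (0:Int) else 1)
      = List.replicate (PySem.List.pyRange (min 256 (max 0 threshold)) 256 1).length 1 := by
    rw [List.map_congr_left (g := fun _ => (1:Int)) ?_, List.map_const']
    intro x hx
    have := (PySem.List.mem_pyRange_one).1 hx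
    exact if_neg (by omega)
  rw [hl, hr, PySem.List.length_pyRange_one, PySem.List.length_pyRange_one]
  unfold get_bin_table_alt
  congr 2 <;> omega

theorem get_bin_table_spec : Claim_equal_get_bin_table := by
  intro threshold _
  show get_bin_table threshold = get_bin_table_alt threshold
  unfold get_bin_table
  have hstep : ∀ (table : List Int) (i : Int),
      (if i < threshold then table ++ [0] else table ++ [1])
        = table ++ [if i < threshold then (0:Int) else 1] := by
    intro table i; split <;> rfl
  simp only [hstep]
  rw [PySem.List.foldl_append_singleton_eq_map, List.nil_append, map_threshold_eq]
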